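-- pv_equiv track=rewrite | github.com/maidxn/Self_Study | Hackerrank/pilingUp.py | CheckGap
-- ===== SOURCE A (Python) =====
-- def CheckGap(array):
--     down = False
--     for index in range(1, len(array)):
--         if array[index - 1] < array[index] and down is False:
--             down = True
--         elif down:
--             if array[index - 1] > array[index]:
--                 return False
--     return True
-- ===== SOURCE B (Python) =====
-- def CheckGap(array):
--     # The loop's verdict is equivalent to: the LAST strict decrease
--     # occurs before the FIRST strict increase (vacuously true if either is absent).
--     n = len(array)
--     rises = [i for i in range(1, n) if array[i - 1] < array[i]]
--     falls = [i for i in range(1, n) if array[i - 1] > array[i]]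
--     if rises and falls:
--         return falls[-1] < rises[0]
--     return True
-- ===== Notes on version B (the rewrite author's own statement) =====
-- stated objective: alternative
-- what changed: Replaces A's stateful flag loop by building the lists of strict-increase and strict-decrease indices and returning whether the last decrease precedes the first increase (vacuously true if either list is empty).
import Mathlib
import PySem

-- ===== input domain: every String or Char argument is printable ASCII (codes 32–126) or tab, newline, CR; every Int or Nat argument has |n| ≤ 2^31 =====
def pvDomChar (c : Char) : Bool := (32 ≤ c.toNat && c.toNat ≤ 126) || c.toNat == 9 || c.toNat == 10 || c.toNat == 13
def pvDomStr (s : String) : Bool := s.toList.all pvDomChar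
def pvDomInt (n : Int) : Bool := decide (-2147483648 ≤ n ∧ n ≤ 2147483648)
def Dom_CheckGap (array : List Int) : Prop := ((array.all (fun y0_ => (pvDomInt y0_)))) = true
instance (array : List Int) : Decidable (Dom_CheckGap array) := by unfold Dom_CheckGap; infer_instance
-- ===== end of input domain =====

-- B replaces A's stateful flag loop by computing the rise and fall index lists and comparing extremes: "the last strict decrease precedes the first strict increase" (same O(n) cost, different decomposition).


-- ===== PORT A =====
-- the for-loop of A over range(1, len(array)) carrying the 'down' flag; early 'return False' = returning false
def CheckGapGo (array : List Int) (idxs : List Nat) (down : Bool) : Bool :=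
  match idxs with
  | [] => true
  | index :: rest =>
    if array.getD (index - 1) 0 < array.getD index 0 && !down then
      CheckGapGo array rest true
    else if down then
      if array.getD (index - 1) 0 > array.getD index 0 then false
      else CheckGapGo array rest down
    else CheckGapGo array rest down

def CheckGap (array : List Int) : Bool :=
  CheckGapGo array (List.range' 1 (array.length - 1)) false

-- ===== PORT B =====
-- Source B: the 'rises'/'falls' comprehensions, then 'falls[-1] < rises[0]' when both are nonempty
def CheckGap_alt (array : List Int) : Bool :=
  match (List.range' 1 (array.length - 1)).filter
          (fun i => decide (array.getD (i - 1) 0 < array.getD i 0)),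
        ((List.range' 1 (array.length - 1)).filter
          (fun i => decide (array.getD (i - 1) 0 > array.getD i 0))).getLast? with
  | r :: _, some f => decide (f < r)
  | _, _ => true

-- ===== PRECONDITION & SPEC =====
def Spec_CheckGap (array : List Int) (out : Bool) : Prop := out = CheckGap_alt array
instance (array : List Int) (out : Bool) : Decidable (Spec_CheckGap array out) := by unfold Spec_CheckGap; infer_instance

-- ===== CLAIM (what is proved, stated in full; the proofs are below) =====
def Claim_equal_CheckGap : Prop := ∀ (array : List Int), Dom_CheckGap array → Spec_CheckGap array (CheckGap array)

-- ===== LEMMAS AND PROOFS =====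

-- once 'down' is true, the loop just checks the remaining pairs are non-decreasing
theorem checkGapGo_true (array : List Int) (idxs : List Nat) :
    CheckGapGo array idxs true =
      idxs.all (fun j => array.getD (j - 1) 0 ≤ array.getD j 0) := by
  induction idxs with
  | nil => rfl
  | cons i rest ih =>
    simp only [CheckGapGo, List.all_cons]
    by_cases h2 : array.getD (i - 1) 0 > array.getD i 0
    · simp only [List.getD_eq_getElem?_getD] at h2
      simp [h2, not_le.mpr h2]
    · simp [ih, ← decide_not, not_lt]

-- with 'down' false, the loop scans to the first increase, then behaves like the down=true loop on the rest
theorem checkGapGo_false (array : List Int) (c s : Nat) :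
    CheckGapGo array (List.range' s c) false =
      match (List.range' s c).find?
              (fun i => array.getD (i - 1) 0 < array.getD i 0) with
      | none => true
      | some i => CheckGapGo array (List.range' (i + 1) (s + c - 1 - i)) true := by
  induction c generalizing s with
  | zero => rfl
  | succ c ih =>
    simp only [List.range'_succ, CheckGapGo, List.find?_cons]
    by_cases h : array.getD (s - 1) 0 < array.getD s 0
    · simp only [h, decide_true, Bool.not_false, Bool.and_true, if_true]
      have : s + (c + 1) - 1 - s = c := by omega
      rw [this]
    · simp only [h, decide_false, Bool.false_and, Bool.false_eq_true,
        if_false, Bool.not_false]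
      rw [ih (s + 1)]
      have : s + 1 + c - 1 = s + (c + 1) - 1 := by omega
      rw [this]

-- the first element of a filtered list is the first element satisfying the predicate
theorem head?_filter_eq_find? {α : Type} (p : α → Bool) (l : List α) :
    (l.filter p).head? = l.find? p := by
  induction l with
  | nil => rfl
  | cons a l ih =>
    by_cases h : p a
    · simp [h]
    · simp [h, ih]

-- in a strictly increasing list, the last element bounds every member
theorem le_getLast?_of_pairwise_lt {l : List Nat} (hp : l.Pairwise (· < ·))
    {f : Nat} (hl : l.getLast? = some f) : ∀ x ∈ l, x ≤ f := by
  obtain ⟨ys, rfl⟩ := List.getLast?_eq_some_iff.mp hl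
  intro x hx
  rcases List.mem_append.mp hx with h | h
  · have := (List.pairwise_append.mp hp).2.2 x h f (by simp)
    omega
  · simp at h; omega

-- ===== VERDICT (by name: the statement is the Claim_ definition above) =====
theorem CheckGap_spec : Claim_equal_CheckGap := by
  intro array _
  unfold Spec_CheckGap CheckGap CheckGap_alt
  rw [checkGapGo_false]
  set n := array.length with hn
  set rp : Nat → Bool := fun i => decide (array.getD (i - 1) 0 < array.getD i 0) with hrp
  set fp : Nat → Bool := fun i => decide (array.getD (i - 1) 0 > array.getD i 0) with hfp
  cases hf : (List.range' 1 (n - 1)).find? rp with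
  | none =>
    have hr : (List.range' 1 (n - 1)).filter rp = [] :=
      List.head?_eq_none_iff.mp (by rw [head?_filter_eq_find?, hf])
    rw [hr]
  | some r0 =>
    have hhead : ((List.range' 1 (n - 1)).filter rp).head? = some r0 := by
      rw [head?_filter_eq_find?, hf]
    obtain ⟨rs, hr⟩ : ∃ rs, (List.range' 1 (n - 1)).filter rp = r0 :: rs := by
      cases hq : (List.range' 1 (n - 1)).filter rp with
      | nil => rw [hq] at hhead; simp at hhead
      | cons x xs =>
        rw [hq] at hhead
        simp only [List.head?_cons, Option.some.injEq] at hhead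
        exact ⟨xs, by rw [hhead]⟩
    rw [hr]
    have hred : (match some r0 with
        | none => true
        | some i => CheckGapGo array (List.range' (i + 1) (1 + (n - 1) - 1 - i)) true)
        = CheckGapGo array (List.range' (r0 + 1) (1 + (n - 1) - 1 - r0)) true := rfl
    rw [hred, checkGapGo_true]
    have hr0mem : r0 ∈ List.range' 1 (n - 1) := List.mem_of_find?_eq_some hf
    have hr0 : 1 ≤ r0 ∧ r0 < 1 + (n - 1) := List.mem_range'_1.mp hr0mem
    have hr0rise : rp r0 = true := List.find?_some hf
    have hfallsPw : ((List.range' 1 (n - 1)).filter fp).Pairwise (· < ·) :=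
      List.Pairwise.filter _ (List.pairwise_lt_range' _ Nat.one_pos)
    cases hl : ((List.range' 1 (n - 1)).filter fp).getLast? with
    | none =>
      have hempty : (List.range' 1 (n - 1)).filter fp = [] :=
        List.getLast?_eq_none_iff.mp hl
      have hmatch : (match (r0 :: rs : List Nat), (none : Option Nat) with
          | r :: _, some f => decide (f < r)
          | _, _ => true) = true := rfl
      rw [hmatch]
      apply List.all_eq_true.mpr
      intro j hj
      have hjr := List.mem_range'_1.mp hj
      have hjmem : j ∈ List.range' 1 (n - 1) := List.mem_range'_1.mpr (by omega)
      by_contra hb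
      have hjfall : fp j = true := by
        simp only [hfp, decide_eq_true_eq]
        simp only [decide_eq_true_eq, not_le] at hb
        omega
      have : j ∈ (List.range' 1 (n - 1)).filter fp := List.mem_filter.mpr ⟨hjmem, hjfall⟩
      rw [hempty] at this
      simp at this
    | some f =>
      have hmatch : (match (r0 :: rs : List Nat), (some f : Option Nat) with
          | r :: _, some f => decide (f < r)
          | _, _ => true) = decide (f < r0) := rfl
      rw [hmatch]
      obtain ⟨ys, hys⟩ := List.getLast?_eq_some_iff.mp hl
      have hfmemF : f ∈ (List.range' 1 (n - 1)).filter fp := by rw [hys]; simp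
      have hfmem : f ∈ List.range' 1 (n - 1) := (List.mem_filter.mp hfmemF).1
      have hffall : fp f = true := (List.mem_filter.mp hfmemF).2
      have hfb : 1 ≤ f ∧ f < 1 + (n - 1) := List.mem_range'_1.mp hfmem
      have hfne : f ≠ r0 := by
        intro h
        rw [h] at hffall
        simp only [hrp, decide_eq_true_eq] at hr0rise
        simp only [hfp, decide_eq_true_eq] at hffall
        omega
      by_cases hcmp : f < r0
      · simp only [hcmp, decide_true]
        apply List.all_eq_true.mpr
        intro j hj
        have hjr := List.mem_range'_1.mp hj
        by_contra hb
        have hjfall : fp j = true := by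
          simp only [hfp, decide_eq_true_eq]
          simp only [decide_eq_true_eq, not_le] at hb
          omega
        have hjmemF : j ∈ (List.range' 1 (n - 1)).filter fp :=
          List.mem_filter.mpr ⟨List.mem_range'_1.mpr (by omega), hjfall⟩
        have := le_getLast?_of_pairwise_lt hfallsPw hl j hjmemF
        omega
      · simp only [hcmp, decide_false]
        refine Bool.eq_false_iff.mpr ?_
        intro hall
        have hfin : f ∈ List.range' (r0 + 1) (1 + (n - 1) - 1 - r0) :=
          List.mem_range'_1.mpr (by omega)
        have := List.all_eq_true.mp hall f hfin
        simp only [hfp, decide_eq_true_eq] at hffall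
        simp only [decide_eq_true_eq] at this
        omega
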